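-- pv_equiv track=rewrite | github.com/Sh-Kod/Server-Neustart | barco_snmp_scan.py | _dec_oid
-- ===== SOURCE A (Python) =====
-- def _dec_oid(b):
--     result = []
--     first = b[0]
--     result += [first // 40, first % 40]
--     i, n = 1, 0
--     while i < len(b):
--         byte = b[i]; i += 1
--         n = (n << 7) | (byte & 0x7F)
--         if not (byte & 0x80):
--             result.append(n); n = 0
--     return '.'.join(str(x) for x in result)
-- ===== SOURCE B (Python) =====
-- def _dec_oid(b):
--     vals = [b[0] // 40, b[0] % 40]
--     groups = []
--     run = []
--     for byte in b[1:]: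
--         run.append(byte)
--         if not (byte & 0x80):
--             groups.append(run)
--             run = []
--     for g in groups:
--         vals.append(sum((x & 0x7F) << (7 * (len(g) - 1 - k)) for k, x in enumerate(g)))
--     return '.'.join(map(str, vals))
-- ===== Notes on version B (the rewrite author's own statement) =====
-- stated objective: alternative
-- what changed: A decodes in one streaming while-loop carrying a running accumulator n; B first partitions the tail into terminator-closed groups, then values each complete group separately by summing its 7-bit chunks shifted into position (dropping an unterminated trailing run), and joins at the end.
import Mathlib
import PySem

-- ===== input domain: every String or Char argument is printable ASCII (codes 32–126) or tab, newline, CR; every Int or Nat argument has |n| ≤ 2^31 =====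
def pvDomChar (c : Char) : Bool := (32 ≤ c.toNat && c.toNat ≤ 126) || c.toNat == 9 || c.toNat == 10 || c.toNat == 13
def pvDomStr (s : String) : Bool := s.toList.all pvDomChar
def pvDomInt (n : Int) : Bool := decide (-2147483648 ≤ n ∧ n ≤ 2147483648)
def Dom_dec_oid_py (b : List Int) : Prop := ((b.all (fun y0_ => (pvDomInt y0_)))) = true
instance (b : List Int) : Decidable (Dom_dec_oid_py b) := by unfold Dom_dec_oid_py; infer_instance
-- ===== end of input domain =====

-- B re-decomposes A's streaming decode into two passes (partition into terminator-closed
-- groups, then value each group by positional shifts); objective: alternative decomposition.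

-- ===== PORT A =====
-- A's while-loop: state n (streaming accumulator) and result (the growing list)
def decOidLoopA : List Int → Int → List Int → List Int
  | [], _, result => result
  | byte :: rest, n, result =>
    let n' := PySem.Int.bor (n <<< (7:Nat)) (PySem.Int.band byte 127)
    if PySem.Int.band byte 128 = 0 then decOidLoopA rest 0 (result ++ [n'])
    else decOidLoopA rest n' result

def dec_oid_py (b : List Int) : String :=
  match b with
  | [] => ""   -- b[0] raises IndexError in Python; excluded by Pre_
  | first :: rest =>
      let result := [PySem.Int.floordiv first 40, PySem.Int.mod first 40]
      PySem.Str.join "." ((decOidLoopA rest 0 result).map PySem.Int.toStr)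

-- ===== PORT B =====
-- one fold step of B's grouping pass: state (groups, run)
def decOidStep (st : List (List Int) × List Int) (byte : Int) : List (List Int) × List Int :=
  let run := st.2 ++ [byte]
  if PySem.Int.band byte 128 = 0 then (st.1 ++ [run], []) else (st.1, run)

-- B's per-group value: sum of 7-bit chunks shifted into position
def decOidGVal (g : List Int) : Int :=
  (g.zipIdx.map (fun xk => (PySem.Int.band xk.1 127) <<< (7 * (g.length - 1 - xk.2)))).sum

def dec_oid_py_alt (b : List Int) : String :=
  match b with
  | [] => ""   -- b[0] raises IndexError in Python; excluded by Pre_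
  | first :: rest =>
      let vals := [PySem.Int.floordiv first 40, PySem.Int.mod first 40]
      let groups := (rest.foldl decOidStep ([], [])).1
      PySem.Str.join "." ((vals ++ groups.map decOidGVal).map PySem.Int.toStr)

-- ===== PRECONDITION & SPEC =====
-- Pre_ excludes only the empty list, on which Python A raises IndexError (b[0]).
def Pre_dec_oid_py (b : List Int) : Prop := b ≠ []
instance (b : List Int) : Decidable (Pre_dec_oid_py b) := by unfold Pre_dec_oid_py; infer_instance
def pvWitness_dec_oid_py : List Int := [43, 6, 129, 1]
def Spec_dec_oid_py (b : List Int) (out : String) : Prop := out = dec_oid_py_alt b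
instance (b : List Int) (out : String) : Decidable (Spec_dec_oid_py b out) := by unfold Spec_dec_oid_py; infer_instance

-- ===== CLAIM (what is proved, stated in full; the proofs are below) =====
def Claim_equal_dec_oid_py : Prop := ∀ (b : List Int), Dom_dec_oid_py b → Pre_dec_oid_py b → Spec_dec_oid_py b (dec_oid_py b)

-- ===== LEMMAS AND PROOFS =====

-- A's streaming accumulator as a fold (proof-side characterisation)
def decOidSVal (run : List Int) : Int :=
  run.foldl (fun n x => PySem.Int.bor (n <<< (7:Nat)) (PySem.Int.band x 127)) 0

-- the common arithmetic form: base-128 positional fold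
def decOidW (g : List Int) : Int :=
  g.foldl (fun n x => n * 128 + PySem.Int.band x 127) 0

theorem band127_nonneg (x : Int) : 0 ≤ PySem.Int.band x 127 := by
  unfold PySem.Int.band
  split_ifs <;> omega

theorem band127_lt (x : Int) : PySem.Int.band x 127 < 128 := by
  unfold PySem.Int.band
  split_ifs with h1 h2 h3
  · have : x.toNat &&& (127 : Int).toNat ≤ (127 : Int).toNat := Nat.and_le_right
    omega
  · omega
  · have : (127 : Int).toNat - ((127 : Int).toNat &&& (-x - 1).toNat) ≤ (127 : Int).toNat :=
      Nat.sub_le _ _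
    omega
  · omega

theorem natlem (a c : Nat) (hc : c < 128) : a <<< 7 ||| c = a * 128 + c := by
  have e : a <<< 7 = a * 2 ^ 7 := by simp [Nat.shiftLeft_eq]
  have h1 : (a <<< 7 ||| c) % 2 ^ 7 = c := by
    rw [Nat.or_mod_two_pow, e, Nat.mul_mod_left, Nat.mod_eq_of_lt (by omega)]
    simp
  have h2 : (a <<< 7 ||| c) / 2 ^ 7 = a := by
    rw [Nat.or_div_two_pow, e, Nat.mul_div_cancel _ (by norm_num), Nat.div_eq_of_lt (by omega)]
    simp
  have h3 := Nat.div_add_mod (a <<< 7 ||| c) (2 ^ 7)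
  omega

theorem bor_shift_eq_add (n c : Int) (hn : 0 ≤ n) (hc : 0 ≤ c) (hc' : c < 128) :
    PySem.Int.bor (n <<< (7:Nat)) c = n * 128 + c := by
  have e : n <<< (7:Nat) = n * 128 := by rw [Int.shiftLeft_eq]; norm_num
  have hnn : 0 ≤ n * 128 := by positivity
  rw [PySem.Int.bor_of_nonneg (by omega) hc]
  have e2 : (n <<< (7:Nat)).toNat = n.toNat <<< 7 := by
    rw [e, Nat.shiftLeft_eq]; omega
  rw [e2, natlem _ _ (by omega)]
  push_cast
  omega

theorem sval_eq_W_aux (g : List Int) :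
    ∀ n : Int, 0 ≤ n →
      g.foldl (fun n x => PySem.Int.bor (n <<< (7:Nat)) (PySem.Int.band x 127)) n
        = g.foldl (fun n x => n * 128 + PySem.Int.band x 127) n := by
  induction g with
  | nil => intro n _; rfl
  | cons x xs ih =>
      intro n hn
      simp only [List.foldl_cons]
      rw [bor_shift_eq_add n _ hn (band127_nonneg x) (band127_lt x)]
      exact ih _ (by have := band127_nonneg x; omega)

theorem sval_eq_W (g : List Int) : decOidSVal g = decOidW g :=
  sval_eq_W_aux g 0 le_rfl

theorem gval_eq_W (g : List Int) : decOidGVal g = decOidW g := by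
  induction g using List.reverseRecOn with
  | nil => rfl
  | append_singleton g x ih =>
      unfold decOidGVal decOidW at *
      rw [List.foldl_append, List.zipIdx_append]
      simp only [List.foldl_cons, List.foldl_nil, List.map_append, List.sum_append,
        List.length_append, List.length_singleton]
      have hx : ((([x].zipIdx (0 + g.length)).map
          (fun xk => (PySem.Int.band xk.1 127) <<< (7 * (g.length + 1 - 1 - xk.2)))).sum)
          = PySem.Int.band x 127 := by
        simp [List.zipIdx]
      rw [hx, ← ih]
      have hmap : g.zipIdx.map (fun xk => (PySem.Int.band xk.1 127) <<< (7 * (g.length + 1 - 1 - xk.2)))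
          = g.zipIdx.map (fun xk => 128 * ((PySem.Int.band xk.1 127) <<< (7 * (g.length - 1 - xk.2)))) := by
        apply List.map_congr_left
        intro p hp
        have hlt := List.mem_zipIdx hp
        rw [Int.shiftLeft_eq, Int.shiftLeft_eq]
        have he : g.length + 1 - 1 - p.2 = (g.length - 1 - p.2) + 1 := by omega
        rw [he, Nat.mul_add, pow_add]
        norm_num
        ring
      rw [hmap, List.sum_map_mul_left]
      ring

theorem gval_eq_sval (g : List Int) : decOidGVal g = decOidSVal g := by
  rw [gval_eq_W, sval_eq_W]

theorem loopA_eq_groups (xs : List Int) :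
    ∀ (gs : List (List Int)) (run acc : List Int),
      decOidLoopA xs (decOidSVal run) (acc ++ gs.map decOidGVal)
        = acc ++ ((xs.foldl decOidStep (gs, run)).1).map decOidGVal := by
  induction xs with
  | nil => intro gs run acc; rfl
  | cons x rest ih =>
      intro gs run acc
      simp only [decOidLoopA, List.foldl_cons, decOidStep]
      have hsv : PySem.Int.bor (decOidSVal run <<< (7:Nat)) (PySem.Int.band x 127)
          = decOidSVal (run ++ [x]) := by
        unfold decOidSVal
        rw [List.foldl_append]
        rfl
      by_cases h : PySem.Int.band x 128 = 0
      · simp only [h]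
        simp only [if_true]
        rw [hsv]
        have e1 : acc ++ gs.map decOidGVal ++ [decOidSVal (run ++ [x])]
            = acc ++ (gs ++ [run ++ [x]]).map decOidGVal := by
          rw [← gval_eq_sval]
          simp
        rw [e1, show (0:Int) = decOidSVal [] from rfl, ih (gs ++ [run ++ [x]]) [] acc]
      · rw [if_neg h, if_neg h, hsv, ih gs (run ++ [x]) acc]

-- ===== VERDICT (by name: the statement is the Claim_ definition above) =====
theorem dec_oid_py_spec : Claim_equal_dec_oid_py := by
  intro b _ hpre
  unfold Spec_dec_oid_py
  cases b with
  | nil => exact absurd rfl hpre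
  | cons first rest =>
      show PySem.Str.join "." ((decOidLoopA rest 0
          [PySem.Int.floordiv first 40, PySem.Int.mod first 40]).map PySem.Int.toStr)
        = dec_oid_py_alt (first :: rest)
      have h := loopA_eq_groups rest [] []
        [PySem.Int.floordiv first 40, PySem.Int.mod first 40]
      simp only [List.map_nil, List.append_nil] at h
      rw [show (0:Int) = decOidSVal [] from rfl, h]
      rfl
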